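-- pv_equiv track=rewrite | github.com/xuancanhit99/Email-Sending-App | P1_8_lists.py | list_manipulations
-- ===== SOURCE A (Python) =====
-- def list_manipulations(numbers, strings):
--     # Task 1: Replace the first occurrence of 20 with 200
--     if 20 in numbers:
--         index_of_20 = numbers.index(20)
--         numbers[index_of_20] = 200
--
--     # Task 2: Remove empty lines from the list of strings
--     cleaned_strings = [string for string in strings if string.strip()]
--
--     # Task 3: Turn a list of numbers into a list of squares of these numbers
--     squared_numbers = [number ** 2 for number in numbers]
--
--     # Task 4: Remove all occurrences of the number 20 from the list
--     numbers_without_20 = [number for number in numbers if number != 20]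
--
--     return numbers, cleaned_strings, squared_numbers, numbers_without_20
-- ===== SOURCE B (Python) =====
-- def list_manipulations(numbers, strings):
--     # One fused pass over numbers: replace first 20 in place, collect squares
--     # and the without-20 list in the same iteration.
--     replaced = False
--     squared_numbers = []
--     numbers_without_20 = []
--     for i, value in enumerate(numbers):
--         if value == 20 and not replaced:
--             numbers[i] = 200
--             value = 200
--             replaced = True
--         squared_numbers.append(value * value)
--         if value != 20:
--             numbers_without_20.append(value)
--     cleaned_strings = [s for s in strings if s.strip()]
--     return numbers, cleaned_strings, squared_numbers, numbers_without_20
-- ===== Notes on version B (the rewrite author's own statement) =====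
-- stated objective: alternative
-- what changed: Fuses A's membership test + index pass + two separate comprehensions over numbers into a single indexed loop with a 'replaced' flag that replaces the first 20, squares, and filters in one pass; string cleanup stays a comprehension.
import Mathlib
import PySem

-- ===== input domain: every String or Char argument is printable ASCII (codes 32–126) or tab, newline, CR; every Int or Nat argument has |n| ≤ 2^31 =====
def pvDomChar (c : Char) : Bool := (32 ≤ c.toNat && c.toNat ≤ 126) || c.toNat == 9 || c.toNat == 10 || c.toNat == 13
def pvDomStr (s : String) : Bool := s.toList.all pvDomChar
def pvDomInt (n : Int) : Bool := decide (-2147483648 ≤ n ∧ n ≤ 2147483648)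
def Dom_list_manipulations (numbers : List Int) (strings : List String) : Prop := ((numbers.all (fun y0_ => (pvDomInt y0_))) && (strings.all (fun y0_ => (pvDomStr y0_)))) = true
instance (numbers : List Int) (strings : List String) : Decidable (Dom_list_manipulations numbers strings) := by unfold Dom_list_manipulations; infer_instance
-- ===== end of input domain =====

-- B fuses A's three separate passes over `numbers` into one indexed loop with a
-- `replaced` flag (objective: alternative decomposition). A mutates `numbers` in
-- place (first 20 → 200); B performs the same mutation; equivalence here is about
-- the returned tuple (which contains the mutated list as its first component).

-- ===== PORT A =====
def list_manipulations (numbers : List Int) (strings : List String) : List Int × List String × List Int × List Int :=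
  -- Task 1: if 20 in numbers: numbers[numbers.index(20)] = 200
  let numbers :=
    if 20 ∈ numbers then
      match PySem.List.index? numbers 20 with
      | some i => numbers.set i 200
      | none => numbers
    else numbers
  -- Task 2: strings with truthy .strip()
  let cleaned_strings := strings.filter (fun s => PySem.Str.strip s ≠ "")
  -- Task 3: squares
  let squared_numbers := numbers.map (fun n => n ^ 2)
  -- Task 4: remove all 20s
  let numbers_without_20 := numbers.filter (fun n => n ≠ 20)
  (numbers, cleaned_strings, squared_numbers, numbers_without_20)

-- ===== PORT B =====
-- the fused loop of Source B: carries the `replaced` flag, builds the (mutated)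
-- numbers list, the squares and the without-20 list in one pass
def pvAltLoop (xs : List Int) (replaced : Bool) : List Int × List Int × List Int :=
  match xs with
  | [] => ([], [], [])
  | n :: rest =>
    let value := if n = 20 ∧ replaced = false then 200 else n
    let replaced' := if n = 20 ∧ replaced = false then true else replaced
    let (ns, sqs, w20) := pvAltLoop rest replaced'
    (value :: ns, value * value :: sqs, if value ≠ 20 then value :: w20 else w20)

def list_manipulations_alt (numbers : List Int) (strings : List String) : List Int × List String × List Int × List Int :=
  let (ns, sqs, w20) := pvAltLoop numbers false
  let cleaned_strings := strings.filter (fun s => PySem.Str.strip s ≠ "")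
  (ns, cleaned_strings, sqs, w20)

-- ===== PRECONDITION & SPEC =====
def Spec_list_manipulations (numbers : List Int) (strings : List String) (out : List Int × List String × List Int × List Int) : Prop := out = list_manipulations_alt numbers strings
instance (numbers : List Int) (strings : List String) (out : List Int × List String × List Int × List Int) : Decidable (Spec_list_manipulations numbers strings out) := by unfold Spec_list_manipulations; infer_instance

-- ===== CLAIM (what is proved, stated in full; the proofs are below) =====
def Claim_equal_list_manipulations : Prop := ∀ (numbers : List Int) (strings : List String), Dom_list_manipulations numbers strings → Spec_list_manipulations numbers strings (list_manipulations numbers strings)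

-- ===== LEMMAS AND PROOFS =====

-- proof-only helper: A's Task-1 expression (replace the first 20 by 200) as a
-- named function, so it can be characterised by recursion on the list
def pvRepl (xs : List Int) : List Int :=
  if 20 ∈ xs then
    match PySem.List.index? xs 20 with
    | some i => xs.set i 200
    | none => xs
  else xs

theorem pvRepl_cons (n : Int) (rest : List Int) :
    pvRepl (n :: rest) = if n = 20 then 200 :: rest else n :: pvRepl rest := by
  by_cases hn : n = 20
  · subst hn
    rw [pvRepl, if_pos (List.mem_cons_self), PySem.List.index?_cons_self]
    simp
  · have hidx := PySem.List.index?_cons_of_ne (xs := rest) (v := (20 : Int)) hn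
    rw [pvRepl, pvRepl, hidx]
    by_cases hm : (20 : Int) ∈ rest
    · rcases Option.isSome_iff_exists.1 ((PySem.List.index?_isSome_iff rest 20).2 hm) with ⟨i, hi⟩
      rw [hi]
      simp [hn, hm, Ne.symm hn]
    · rw [(PySem.List.index?_eq_none_iff rest 20).2 hm]
      simp [hn, hm, Ne.symm hn]

-- once `replaced` is true the fused loop leaves the list unchanged and just
-- squares and filters it
theorem pvAltLoop_true (xs : List Int) :
    pvAltLoop xs true = (xs, xs.map (fun n => n * n), xs.filter (fun n => n ≠ 20)) := by
  induction xs with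
  | nil => rfl
  | cons n rest ih =>
    simp only [pvAltLoop, List.filter_cons]
    simp [ih]

-- starting with replaced = false, the fused loop computes the replace-first
-- result together with its squares and its without-20 filtering
theorem pvAltLoop_false (xs : List Int) :
    pvAltLoop xs false =
      ((pvRepl xs), (pvRepl xs).map (fun n => n * n), (pvRepl xs).filter (fun n => n ≠ 20)) := by
  induction xs with
  | nil => rfl
  | cons n rest ih =>
    rw [pvRepl_cons]
    by_cases hn : n = 20
    · subst hn
      simp [pvAltLoop, pvAltLoop_true]
    · simp only [pvAltLoop, if_neg hn, List.map_cons, List.filter_cons]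
      simp [hn, ih]

-- ===== VERDICT (by name: the statement is the Claim_ definition above) =====
theorem list_manipulations_spec : Claim_equal_list_manipulations := by
  intro numbers strings _
  unfold Spec_list_manipulations list_manipulations list_manipulations_alt
  rw [show (if 20 ∈ numbers then
      match PySem.List.index? numbers 20 with
      | some i => numbers.set i 200
      | none => numbers
    else numbers) = pvRepl numbers from rfl, pvAltLoop_false]
  simp [pow_two]
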